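-- pv_equiv track=rewrite | github.com/m-webster/XPFpackage | cellulation.py | UDBoundary
-- ===== SOURCE A (Python) =====
-- def UDBoundary(vertices):
--     Xmax = dict()
--     Xmin = dict()
--     for (x,y) in vertices:
--         if x not in Xmax:
--             Xmin[x],Xmax[x] = y,y
--         if y < Xmin[x]:
--             Xmin[x] = y
--         if y > Xmax[x]:
--             Xmax[x] = y
--     XCoord =  sorted(Xmax.keys())
--     Ymin = min(Xmin.values())
--     Ymax = max(Xmax.values())
--     top,bottom = [],[]
--     for x in XCoord:
--         # if Xmax[x] in Ymax and Xmin[x] in Ymin: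
--         if Xmax[x] > Ymax - 2 and Xmin[x] < Ymin + 2:
--             top.append((x,Xmax[x]))
--             bottom.append((x,Xmin[x]))
--     return top,bottom
-- ===== SOURCE B (Python) =====
-- def UDBoundary(vertices):
--     ys = [y for _, y in vertices]
--     Ymin, Ymax = min(ys), max(ys)
--     top, bottom = [], []
--     for x in sorted({x for x, _ in vertices}):
--         group = [y for vx, y in vertices if vx == x]
--         hi, lo = max(group), min(group)
--         if hi > Ymax - 2 and lo < Ymin + 2:
--             top.append((x, hi))
--             bottom.append((x, lo))
--     return top, bottom
-- ===== Notes on version B (the rewrite author's own statement) =====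
-- stated objective: simpler
-- what changed: Replaces the incremental two-dict min/max bookkeeping with membership guards by a direct pass: global Ymin/Ymax from all y's at once, then iterate the sorted distinct x's and compute each x's group min/max by a comprehension.
import Mathlib
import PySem

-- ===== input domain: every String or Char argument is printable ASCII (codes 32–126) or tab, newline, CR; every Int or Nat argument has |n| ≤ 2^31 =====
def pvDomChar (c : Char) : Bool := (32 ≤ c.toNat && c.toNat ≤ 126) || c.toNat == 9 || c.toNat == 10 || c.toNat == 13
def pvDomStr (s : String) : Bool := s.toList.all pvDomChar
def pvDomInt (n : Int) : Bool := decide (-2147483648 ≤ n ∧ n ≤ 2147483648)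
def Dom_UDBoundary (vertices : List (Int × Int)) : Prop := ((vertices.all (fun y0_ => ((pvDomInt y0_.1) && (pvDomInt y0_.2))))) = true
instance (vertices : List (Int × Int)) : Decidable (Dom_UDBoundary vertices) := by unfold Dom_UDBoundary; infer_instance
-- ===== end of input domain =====

-- B is the same boundary computation written directly (global y-extrema once, then per-x group min/max over sorted distinct x's) instead of A's incremental two-dict bookkeeping; A raises ValueError on an empty list, excluded by Pre_.

-- ===== PORT A =====
-- the body of A's 'for (x,y) in vertices' loop over the two dicts Xmin, Xmax
def pvAstep (st : PySem.Dict Int Int × PySem.Dict Int Int) (v : Int × Int) :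
    PySem.Dict Int Int × PySem.Dict Int Int :=
  let x := v.1; let y := v.2
  let st1 := if st.2.contains x then st else (st.1.insert x y, st.2.insert x y)
  -- Xmin[x] / Xmax[x] are always present here; getD 0 is exact
  let st2 := if y < st1.1.getD x 0 then (st1.1.insert x y, st1.2) else st1
  if st2.2.getD x 0 < y then (st2.1, st2.2.insert x y) else st2

def pvAfold (vertices : List (Int × Int)) : PySem.Dict Int Int × PySem.Dict Int Int :=
  vertices.foldl pvAstep (PySem.Dict.empty, PySem.Dict.empty)

def UDBoundary (vertices : List (Int × Int)) : (List (Int × Int)) × (List (Int × Int)) :=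
  let Xmin := (pvAfold vertices).1
  let Xmax := (pvAfold vertices).2
  let XCoord := PySem.List.sorted Xmax.keys (fun x => x) false
  -- min(...)/max(...) of a dict's values: Python raises on empty (excluded by Pre_), getD 0 is exact otherwise
  let Ymin := (PySem.List.min? Xmin.values (fun y => y)).getD 0
  let Ymax := (PySem.List.max? Xmax.values (fun y => y)).getD 0
  XCoord.foldl (fun tb x =>
    if Xmax.getD x 0 > Ymax - 2 ∧ Xmin.getD x 0 < Ymin + 2 then
      (tb.1 ++ [(x, Xmax.getD x 0)], tb.2 ++ [(x, Xmin.getD x 0)])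
    else tb) ([], [])

-- ===== PORT B =====
-- [y for vx, y in vertices if vx == x]
def pvGroup (vertices : List (Int × Int)) (x : Int) : List Int :=
  (vertices.filter (fun v => v.1 == x)).map (fun v => v.2)

def UDBoundary_alt (vertices : List (Int × Int)) : (List (Int × Int)) × (List (Int × Int)) :=
  let ys := vertices.map (fun v => v.2)
  let Ymin := (PySem.List.min? ys (fun y => y)).getD 0
  let Ymax := (PySem.List.max? ys (fun y => y)).getD 0
  let xs := PySem.List.sorted (PySem.Set.ofList (vertices.map (fun v => v.1))) (fun x => x) false
  xs.foldl (fun tb x =>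
    let hi := (PySem.List.max? (pvGroup vertices x) (fun y => y)).getD 0
    let lo := (PySem.List.min? (pvGroup vertices x) (fun y => y)).getD 0
    if hi > Ymax - 2 ∧ lo < Ymin + 2 then
      (tb.1 ++ [(x, hi)], tb.2 ++ [(x, lo)])
    else tb) ([], [])

-- ===== PRECONDITION & SPEC =====
-- A raises ValueError (min() of an empty sequence) on the empty list; excluded.
def Pre_UDBoundary (vertices : List (Int × Int)) : Prop := vertices ≠ []
instance (vertices : List (Int × Int)) : Decidable (Pre_UDBoundary vertices) := by unfold Pre_UDBoundary; infer_instance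
def pvWitness_UDBoundary : (List (Int × Int)) := [(0, 0), (1, 3)]

def Spec_UDBoundary (vertices : List (Int × Int)) (out : (List (Int × Int)) × (List (Int × Int))) : Prop := out = UDBoundary_alt vertices
instance (vertices : List (Int × Int)) (out : (List (Int × Int)) × (List (Int × Int))) : Decidable (Spec_UDBoundary vertices out) := by unfold Spec_UDBoundary; infer_instance

-- ===== CLAIM (what is proved, stated in full; the proofs are below) =====
def Claim_equal_UDBoundary : Prop := ∀ (vertices : List (Int × Int)), Dom_UDBoundary vertices → Pre_UDBoundary vertices → Spec_UDBoundary vertices (UDBoundary vertices)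

-- ===== LEMMAS AND PROOFS =====

-- min/max of a list extended by one element
lemma pv_min?_append (g : List Int) (b : Int) :
    PySem.List.min? (g ++ [b]) (fun y => y) =
      some ((PySem.List.min? g (fun y => y)).elim b (fun m => min m b)) := by
  cases g with
  | nil => simp [PySem.List.min?]
  | cons h t => simp [PySem.List.min?_id_cons, List.foldl_append]

lemma pv_max?_append (g : List Int) (b : Int) :
    PySem.List.max? (g ++ [b]) (fun y => y) =
      some ((PySem.List.max? g (fun y => y)).elim b (fun m => max m b)) := by
  cases g with
  | nil => simp [PySem.List.max?]
  | cons h t => simp [PySem.List.max?_id_cons, List.foldl_append]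

lemma pvGroup_append (vs : List (Int × Int)) (a b x : Int) :
    pvGroup (vs ++ [(a, b)]) x = if a = x then pvGroup vs x ++ [b] else pvGroup vs x := by
  simp only [pvGroup, List.filter_append, List.map_append]
  by_cases h : a = x <;> simp [h]

-- the main invariant of A's dict-building loop
lemma pvAfold_get (vs : List (Int × Int)) : ∀ x : Int,
    (pvAfold vs).1.get? x = PySem.List.min? (pvGroup vs x) (fun y => y) ∧
    (pvAfold vs).2.get? x = PySem.List.max? (pvGroup vs x) (fun y => y) := by
  induction vs using List.reverseRecOn with
  | nil =>
    intro x
    simp [pvAfold, pvGroup, PySem.List.min?, PySem.List.max?, PySem.Dict.get?_empty]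
  | append_singleton vs v ih =>
    obtain ⟨a, b⟩ := v
    intro x
    have hfold : pvAfold (vs ++ [(a, b)]) = pvAstep (pvAfold vs) (a, b) := by
      simp [pvAfold, List.foldl_append]
    rw [hfold, pvGroup_append]
    by_cases hxa : a = x
    · subst hxa
      have ha1 := (ih a).1
      have ha2 := (ih a).2
      have hcont : (pvAfold vs).2.contains a
          = (PySem.List.max? (pvGroup vs a) (fun y => y)).isSome := by
        rw [PySem.Dict.contains_eq_isSome_get?, ha2]
      rcases hG : PySem.List.max? (pvGroup vs a) (fun y => y) with _ | M
      · -- group so far is empty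
        have hnil : pvGroup vs a = [] := (PySem.List.max?_eq_none_iff _ _).mp hG
        rw [hnil] at ha1 ha2 ⊢
        simp only [PySem.List.min?, PySem.List.max?] at ha1 ha2
        simp only [pvAstep, hcont, hG, Option.isSome_none]
        simp [PySem.Dict.getD_insert_self, PySem.Dict.get?_insert_self,
          PySem.List.min?, PySem.List.max?]
      · -- group so far is nonempty
        have hne : pvGroup vs a ≠ [] := by
          intro h; rw [h] at hG; simp [PySem.List.max?] at hG
        rcases hg : PySem.List.min? (pvGroup vs a) (fun y => y) with _ | m
        · exact absurd ((PySem.List.min?_eq_none_iff _ _).mp hg) hne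
        rw [hg] at ha1; rw [hG] at ha2
        have hgd1 : (pvAfold vs).1.getD a 0 = m := by
          rw [PySem.Dict.getD_eq_get?_getD, ha1]; rfl
        have hgd2 : (pvAfold vs).2.getD a 0 = M := by
          rw [PySem.Dict.getD_eq_get?_getD, ha2]; rfl
        simp only [pvAstep, hcont, hG, Option.isSome_some, if_true]
        rw [pv_min?_append, pv_max?_append, hg, hG]
        by_cases hbm : b < m
        · simp only [hgd1, hbm, if_true]
          by_cases hMb : M < b
          · simp [PySem.Dict.getD_eq_get?_getD, PySem.Dict.get?_insert_self, ha2,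
              PySem.Dict.get?_insert_self, hMb, min_def, max_def]
            constructor <;> omega
          · have hgd2' : ((pvAfold vs).1.insert a b, (pvAfold vs).2).2.getD a 0 = M := hgd2
            simp only [hgd2', hMb, if_false]
            simp [PySem.Dict.get?_insert_self, ha2, min_def, max_def]
            constructor <;> omega
        · simp only [hgd1, hbm, if_false]
          by_cases hMb : M < b
          · simp [hgd2, hMb, PySem.Dict.get?_insert_self, ha1, min_def, max_def]
            constructor <;> omega
          · simp [hgd2, hMb, ha1, ha2, min_def, max_def]
            constructor <;> omega
    · -- key of the new vertex differs from x: nothing at x changes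
      have h1 := (ih x).1
      have h2 := (ih x).2
      have hne : x ≠ a := fun h => hxa h.symm
      simp only [hxa, if_false]
      simp only [pvAstep]
      split_ifs <;>
        simp_all [PySem.Dict.get?_insert_of_ne _ _ hne]

-- keys of A's dicts stay Nodup
lemma pvAfold_nodup (vs : List (Int × Int)) :
    (pvAfold vs).1.keys.Nodup ∧ (pvAfold vs).2.keys.Nodup := by
  induction vs using List.reverseRecOn with
  | nil => simp [pvAfold]
  | append_singleton vs v ih =>
    have hfold : pvAfold (vs ++ [v]) = pvAstep (pvAfold vs) v := by
      simp [pvAfold, List.foldl_append]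
    rw [hfold]
    simp only [pvAstep]
    split_ifs <;> constructor <;> dsimp only <;>
      first
      | exact ih.1
      | exact ih.2
      | · apply PySem.Dict.nodup_keys_insert
          first
          | exact ih.1
          | exact ih.2
          | · apply PySem.Dict.nodup_keys_insert
              first | exact ih.1 | exact ih.2

lemma pvGroup_ne_nil_iff (vs : List (Int × Int)) (x : Int) :
    pvGroup vs x ≠ [] ↔ x ∈ vs.map (fun v => v.1) := by
  simp only [pvGroup, ne_eq, List.map_eq_nil_iff, List.filter_eq_nil_iff, List.mem_map]
  push Not
  constructor
  · rintro ⟨v, hv, hbe⟩; exact ⟨v, hv, by simpa using hbe⟩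
  · rintro ⟨v, hv, hbe⟩; exact ⟨v, hv, by simpa using hbe⟩

lemma pvGroup_subset (vs : List (Int × Int)) (x y : Int) (h : y ∈ pvGroup vs x) :
    y ∈ vs.map (fun v => v.2) := by
  simp only [pvGroup, List.mem_map, List.mem_filter] at h
  obtain ⟨v, ⟨hv, _⟩, hy⟩ := h
  exact List.mem_map.mpr ⟨v, hv, hy⟩

lemma pvGroup_mem_self (vs : List (Int × Int)) (v : Int × Int) (h : v ∈ vs) :
    v.2 ∈ pvGroup vs v.1 := by
  simp only [pvGroup, List.mem_map, List.mem_filter]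
  exact ⟨v, ⟨h, by simp⟩, rfl⟩

lemma pv_min?_eq_some_iff (l : List Int) (m : Int) :
    PySem.List.min? l (fun y => y) = some m ↔ m ∈ l ∧ ∀ a ∈ l, m ≤ a := by
  constructor
  · intro h
    exact ⟨PySem.List.min?_mem h, fun a ha => PySem.List.min?_isMin h a ha⟩
  · rintro ⟨hm, hall⟩
    rcases hmin : PySem.List.min? l (fun y => y) with _ | m'
    · rw [(PySem.List.min?_eq_none_iff _ _).mp hmin] at hm; simp at hm
    · have h1 : m' ≤ m := PySem.List.min?_isMin hmin m hm
      have h2 : m ≤ m' := hall m' (PySem.List.min?_mem hmin)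
      rw [le_antisymm h1 h2]

lemma pv_max?_eq_some_iff (l : List Int) (m : Int) :
    PySem.List.max? l (fun y => y) = some m ↔ m ∈ l ∧ ∀ a ∈ l, a ≤ m := by
  constructor
  · intro h
    exact ⟨PySem.List.max?_mem h, fun a ha => PySem.List.max?_isMax h a ha⟩
  · rintro ⟨hm, hall⟩
    rcases hmax : PySem.List.max? l (fun y => y) with _ | m'
    · rw [(PySem.List.max?_eq_none_iff _ _).mp hmax] at hm; simp at hm
    · have h1 : m ≤ m' := PySem.List.max?_isMax hmax m hm
      have h2 : m' ≤ m := hall m' (PySem.List.max?_mem hmax)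
      rw [le_antisymm h2 h1]

-- membership in the keys of A's dicts
lemma pvAfold_mem_keys1 (vs : List (Int × Int)) (x : Int) :
    x ∈ (pvAfold vs).1.keys ↔ x ∈ vs.map (fun v => v.1) := by
  rw [← PySem.Dict.contains_iff_mem_keys, PySem.Dict.contains_eq_isSome_get?,
    (pvAfold_get vs x).1, ← pvGroup_ne_nil_iff]
  simp [Option.isSome_iff_ne_none, PySem.List.min?_eq_none_iff]

lemma pvAfold_mem_keys2 (vs : List (Int × Int)) (x : Int) :
    x ∈ (pvAfold vs).2.keys ↔ x ∈ vs.map (fun v => v.1) := by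
  rw [← PySem.Dict.contains_iff_mem_keys, PySem.Dict.contains_eq_isSome_get?,
    (pvAfold_get vs x).2, ← pvGroup_ne_nil_iff]
  simp [Option.isSome_iff_ne_none, PySem.List.max?_eq_none_iff]

-- A's sorted key list is B's sorted distinct-x list
lemma pv_XCoord_eq (vs : List (Int × Int)) :
    PySem.List.sorted (pvAfold vs).2.keys (fun x => x) false
      = PySem.List.sorted (PySem.Set.ofList (vs.map (fun v => v.1))) (fun x => x) false := by
  apply PySem.List.sorted_eq_of_perm_of_pairwise_lt
  · refine (PySem.List.sorted_perm _ _ _).trans ?_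
    refine (List.perm_ext_iff_of_nodup (PySem.Set.nodup_ofList _) (pvAfold_nodup vs).2).mpr ?_
    intro a
    rw [PySem.Set.mem_ofList, pvAfold_mem_keys2]
  · exact PySem.List.sorted_ofList_pairwise_lt _

-- global y-minimum: A's min over the per-x minima equals B's min over all y's
lemma pv_Ymin_eq (vs : List (Int × Int)) (h : vs ≠ []) :
    PySem.List.min? (pvAfold vs).1.values (fun y => y)
      = PySem.List.min? (vs.map (fun v => v.2)) (fun y => y) := by
  have hys : vs.map (fun v => v.2) ≠ [] := by simpa using h
  rcases hm : PySem.List.min? (vs.map (fun v => v.2)) (fun y => y) with _ | m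
  · exact absurd ((PySem.List.min?_eq_none_iff _ _).mp hm) hys
  rw [hm, pv_min?_eq_some_iff]
  have hvals : (pvAfold vs).1.values
      = ((pvAfold vs).1.keys).map (fun k => (pvAfold vs).1.getD k 0) :=
    PySem.Dict.values_eq_map_keys _ (pvAfold_nodup vs).1 0
  -- each dict value is the min of its group, hence a y-value ≥ m
  have hval : ∀ k ∈ (pvAfold vs).1.keys,
      (pvAfold vs).1.getD k 0 ∈ pvGroup vs k := by
    intro k hk
    have hne := (pvGroup_ne_nil_iff vs k).mpr ((pvAfold_mem_keys1 vs k).mp hk)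
    rcases hμ : PySem.List.min? (pvGroup vs k) (fun y => y) with _ | μ
    · exact absurd ((PySem.List.min?_eq_none_iff _ _).mp hμ) hne
    · rw [PySem.Dict.getD_eq_get?_getD, (pvAfold_get vs k).1, hμ]
      exact PySem.List.min?_mem hμ
  constructor
  · -- m itself is one of the per-x minima
    obtain ⟨v, hv, hv2⟩ := List.mem_map.mp (PySem.List.min?_mem hm)
    have hk : v.1 ∈ (pvAfold vs).1.keys :=
      (pvAfold_mem_keys1 vs v.1).mpr (List.mem_map.mpr ⟨v, hv, rfl⟩)
    have hmem := hval v.1 hk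
    have h1 : m ≤ (pvAfold vs).1.getD v.1 0 :=
      PySem.List.min?_isMin hm _ (pvGroup_subset vs v.1 _ hmem)
    have h2 : (pvAfold vs).1.getD v.1 0 ≤ m := by
      rcases hμ : PySem.List.min? (pvGroup vs v.1) (fun y => y) with _ | μ
      · have := (PySem.List.min?_eq_none_iff _ _).mp hμ
        have := pvGroup_mem_self vs v hv
        simp_all
      · rw [PySem.Dict.getD_eq_get?_getD, (pvAfold_get vs v.1).1, hμ]
        have := PySem.List.min?_isMin hμ v.2 (pvGroup_mem_self vs v hv)
        simpa [hv2] using this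
    rw [hvals]
    exact List.mem_map.mpr ⟨v.1, hk, le_antisymm h2 h1⟩
  · intro a ha
    rw [hvals] at ha
    obtain ⟨k, hk, hka⟩ := List.mem_map.mp ha
    rw [← hka]
    exact PySem.List.min?_isMin hm _ (pvGroup_subset vs k _ (hval k hk))

-- global y-maximum, symmetrically
lemma pv_Ymax_eq (vs : List (Int × Int)) (h : vs ≠ []) :
    PySem.List.max? (pvAfold vs).2.values (fun y => y)
      = PySem.List.max? (vs.map (fun v => v.2)) (fun y => y) := by
  have hys : vs.map (fun v => v.2) ≠ [] := by simpa using h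
  rcases hm : PySem.List.max? (vs.map (fun v => v.2)) (fun y => y) with _ | m
  · exact absurd ((PySem.List.max?_eq_none_iff _ _).mp hm) hys
  rw [hm, pv_max?_eq_some_iff]
  have hvals : (pvAfold vs).2.values
      = ((pvAfold vs).2.keys).map (fun k => (pvAfold vs).2.getD k 0) :=
    PySem.Dict.values_eq_map_keys _ (pvAfold_nodup vs).2 0
  have hval : ∀ k ∈ (pvAfold vs).2.keys,
      (pvAfold vs).2.getD k 0 ∈ pvGroup vs k := by
    intro k hk
    have hne := (pvGroup_ne_nil_iff vs k).mpr ((pvAfold_mem_keys2 vs k).mp hk)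
    rcases hμ : PySem.List.max? (pvGroup vs k) (fun y => y) with _ | μ
    · exact absurd ((PySem.List.max?_eq_none_iff _ _).mp hμ) hne
    · rw [PySem.Dict.getD_eq_get?_getD, (pvAfold_get vs k).2, hμ]
      exact PySem.List.max?_mem hμ
  constructor
  · obtain ⟨v, hv, hv2⟩ := List.mem_map.mp (PySem.List.max?_mem hm)
    have hk : v.1 ∈ (pvAfold vs).2.keys :=
      (pvAfold_mem_keys2 vs v.1).mpr (List.mem_map.mpr ⟨v, hv, rfl⟩)
    have hmem := hval v.1 hk
    have h1 : (pvAfold vs).2.getD v.1 0 ≤ m :=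
      PySem.List.max?_isMax hm _ (pvGroup_subset vs v.1 _ hmem)
    have h2 : m ≤ (pvAfold vs).2.getD v.1 0 := by
      rcases hμ : PySem.List.max? (pvGroup vs v.1) (fun y => y) with _ | μ
      · have := (PySem.List.max?_eq_none_iff _ _).mp hμ
        have := pvGroup_mem_self vs v hv
        simp_all
      · rw [PySem.Dict.getD_eq_get?_getD, (pvAfold_get vs v.1).2, hμ]
        have := PySem.List.max?_isMax hμ v.2 (pvGroup_mem_self vs v hv)
        simpa [hv2] using this
    rw [hvals]
    exact List.mem_map.mpr ⟨v.1, hk, le_antisymm h1 h2⟩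
  · intro a ha
    rw [hvals] at ha
    obtain ⟨k, hk, hka⟩ := List.mem_map.mp ha
    rw [← hka]
    exact PySem.List.max?_isMax hm _ (pvGroup_subset vs k _ (hval k hk))

-- ===== VERDICT (by name: the statement is the Claim_ definition above) =====
theorem UDBoundary_spec : Claim_equal_UDBoundary := by
  intro vs _ hpre
  unfold Spec_UDBoundary
  simp only [UDBoundary, UDBoundary_alt]
  rw [pv_XCoord_eq, pv_Ymin_eq vs hpre, pv_Ymax_eq vs hpre]
  apply PySem.List.foldl_congr_mem
  intro acc x _
  simp only [PySem.Dict.getD_eq_get?_getD, (pvAfold_get vs x).1, (pvAfold_get vs x).2]
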